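-- pv_equiv track=rewrite | github.com/ianlai/Algorithm-Python | algo/_Practice/KT/RectangleFinder1.py | rectangleFinder
-- ===== SOURCE A (Python) =====
-- def rectangleFinder(grid):
--     if len(grid) == 0 or len(grid[0]) == 0:
--         return []
--
--     res = []
--     for i in range(len(grid)):
--         for j in range(len(grid[0])):
--             if grid[i][j] == 0:
--                 down, right = i, j
--                 for row in range(i, len(grid)):
--                     if grid[row][j] == 0:
--                         down = row
--                 for col in range(j, len(grid[0])):
--                     if grid[i][col] == 0:
--                         right = col
--                 res.append((i, j))
--                 res.append((down, right))
--                 return res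
--     return res
-- ===== SOURCE B (Python) =====
-- def rectangleFinder(grid):
--     if not grid or not grid[0]:
--         return []
--     n = len(grid[0])
--     zeros = [(i, j) for i in range(len(grid)) for j in range(n) if grid[i][j] == 0]
--     if not zeros:
--         return []
--     i, j = zeros[0]
--     down = max(r for r, c in zeros if c == j)
--     right = max(c for r, c in zeros if r == i)
--     return [(i, j), (down, right)]
-- ===== Notes on version B (the rewrite author's own statement) =====
-- stated objective: alternative
-- what changed: B builds the list of all zero coordinates once by a single comprehension and then answers by aggregation over that list (its head is the first zero; the extents are max() over filters of it), replacing A's nested search loops plus two dedicated last-zero grid scans.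
-- outside the precondition, e.g. on rectangleFinder([[0, 1], [5]]): A returns [(0, 0), (0, 0)], B raises IndexError
import Mathlib
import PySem

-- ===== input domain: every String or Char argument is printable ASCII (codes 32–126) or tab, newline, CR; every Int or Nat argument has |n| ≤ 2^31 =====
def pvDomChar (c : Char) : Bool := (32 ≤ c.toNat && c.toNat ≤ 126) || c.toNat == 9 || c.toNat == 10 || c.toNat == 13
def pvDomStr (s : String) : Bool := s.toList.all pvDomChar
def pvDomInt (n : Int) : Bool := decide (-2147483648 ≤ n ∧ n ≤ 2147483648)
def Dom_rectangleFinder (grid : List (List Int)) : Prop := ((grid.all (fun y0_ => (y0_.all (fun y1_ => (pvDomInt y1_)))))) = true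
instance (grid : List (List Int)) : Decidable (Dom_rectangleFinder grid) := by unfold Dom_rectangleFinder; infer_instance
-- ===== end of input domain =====

-- B materialises the list of all zero coordinates once (row-major) and answers by aggregation
-- (head, and max over filters of that list), replacing A's three separate grid scans (alternative).


-- grid[i][j]; inside Pre_ every accessed index is in range, so the defaults are never used
def pvCell (g : List (List Int)) (i j : Nat) : Int := (g.getD i []).getD j 1

-- ===== PORT A =====
-- inner 'for j in range(n): if grid[i][j]==0: …return' of A's search
def pvAscanJ (g : List (List Int)) (n i j : Nat) : Option Nat :=
  if _h : j < n then
    (if pvCell g i j = 0 then some j else pvAscanJ g n i (j+1))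
  else none
termination_by n - j

-- outer 'for i in range(len(grid)): …' of A's search
def pvAscanI (g : List (List Int)) (n i : Nat) : Option (Nat × Nat) :=
  if _h : i < g.length then
    (match pvAscanJ g n i 0 with
     | some j => some (i, j)
     | none => pvAscanI g n (i+1))
  else none
termination_by g.length - i

def rectangleFinder (grid : List (List Int)) : List (Int × Int) :=
  if grid.length = 0 ∨ (grid.headD []).length = 0 then []
  else
    match pvAscanI grid (grid.headD []).length 0 with
    | none => []
    | some (i, j) =>
      -- for row in range(i, len(grid)): if grid[row][j]==0: down = row
      -- for col in range(j, n): if grid[i][col]==0: right = col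
      [((i : Int), (j : Int)),
       (((((List.range' i (grid.length - i)).foldl
            (fun acc r => if pvCell grid r j = 0 then r else acc) i : Nat)) : Int),
        ((((List.range' j ((grid.headD []).length - j)).foldl
            (fun acc c => if pvCell grid i c = 0 then c else acc) j : Nat)) : Int))]

-- ===== PORT B =====
-- zeros = [(i, j) for i in range(len(grid)) for j in range(n) if grid[i][j] == 0]
def pvZeros (grid : List (List Int)) (n : Nat) : List (Nat × Nat) :=
  (List.range grid.length).flatMap
    (fun i => ((List.range n).filter (fun j => decide (pvCell grid i j = 0))).map (fun j => (i, j)))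

def rectangleFinder_alt (grid : List (List Int)) : List (Int × Int) :=
  if grid.isEmpty ∨ (grid.headD []).isEmpty then []
  else
    match pvZeros grid (grid.headD []).length with
    | [] => []
    | (i, j) :: _ =>
      -- down = max(r for r, c in zeros if c == j); right = max(c for r, c in zeros if r == i)
      -- Python's max raises on an empty sequence; (i,j) itself passes both filters, so the
      -- .getD defaults are never used.
      [((i : Int), (j : Int)),
       (((((pvZeros grid (grid.headD []).length).filter (fun p => p.2 == j)).map Prod.fst).max?.getD i : Nat),
        ((((pvZeros grid (grid.headD []).length).filter (fun p => p.1 == i)).map Prod.snd).max?.getD j : Nat))]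

-- ===== PRECONDITION & SPEC =====
-- Pre_ excludes ragged grids with a row shorter than the first row: on those A generally raises
-- IndexError (and on the few where A's accesses happen to stay in range and A returns, B raises).
def Pre_rectangleFinder (grid : List (List Int)) : Prop :=
  ∀ row ∈ grid, (grid.headD []).length ≤ row.length
instance (grid : List (List Int)) : Decidable (Pre_rectangleFinder grid) := by
  unfold Pre_rectangleFinder; infer_instance

def pvWitness_rectangleFinder : List (List Int) := [[1, 0], [2, 3]]

def Spec_rectangleFinder (grid : List (List Int)) (out : List (Int × Int)) : Prop :=
  out = rectangleFinder_alt grid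
instance (grid : List (List Int)) (out : List (Int × Int)) : Decidable (Spec_rectangleFinder grid out) := by
  unfold Spec_rectangleFinder; infer_instance

-- ===== CLAIM (what is proved, stated in full; the proofs are below) =====
def Claim_equal_rectangleFinder : Prop := ∀ (grid : List (List Int)), Dom_rectangleFinder grid → Pre_rectangleFinder grid → Spec_rectangleFinder grid (rectangleFinder grid)

-- ===== LEMMAS AND PROOFS =====

-- A's inner row scan is find? over the column range
theorem pvAscanJ_eq (g : List (List Int)) (n i : Nat) :
    ∀ j, pvAscanJ g n i j =
      (List.range' j (n - j)).find? (fun jj => decide (pvCell g i jj = 0)) := by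
  intro j
  induction hk : n - j generalizing j with
  | zero =>
    rw [pvAscanJ]; simp [show ¬ j < n by omega]
  | succ k ih =>
    rw [pvAscanJ, List.range'_succ]
    have hj : j < n := by omega
    simp only [hj, dif_pos, List.find?_cons]
    by_cases hz : pvCell g i j = 0
    · simp [hz]
    · simp only [hz, if_neg, not_false_iff]
      rw [ih (j+1) (by omega)]
      simp

-- A's outer scan is the head of B's zero list (over the remaining rows)
theorem pvAscanI_eq (g : List (List Int)) (n : Nat) :
    ∀ i, pvAscanI g n i =
      ((List.range' i (g.length - i)).flatMap
        (fun r => ((List.range n).filter (fun c => decide (pvCell g r c = 0))).map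
          (fun c => (r, c)))).head? := by
  intro i
  induction hk : g.length - i generalizing i with
  | zero =>
    rw [pvAscanI]; simp [show ¬ i < g.length by omega]
  | succ k ih =>
    rw [pvAscanI, List.range'_succ]
    have hi : i < g.length := by omega
    simp only [hi, dif_pos, List.flatMap_cons, List.head?_append]
    have hrow : pvAscanJ g n i 0
        = ((List.range n).filter (fun c => decide (pvCell g i c = 0))).head? := by
      rw [pvAscanJ_eq, List.head?_filter]
      simp [List.range_eq_range']
    cases hj : pvAscanJ g n i 0 with
    | some j =>
      rw [hrow] at hj
      cases hfil : (List.range n).filter (fun c => decide (pvCell g i c = 0)) with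
      | nil => rw [hfil] at hj; simp at hj
      | cons c t =>
        rw [hfil] at hj; simp at hj
        subst hj; simp
    | none =>
      rw [hrow] at hj
      have hfil : (List.range n).filter (fun c => decide (pvCell g i c = 0)) = [] := by
        cases hfil : (List.range n).filter (fun c => decide (pvCell g i c = 0)) with
        | nil => rfl
        | cons c t => rw [hfil] at hj; simp at hj
      rw [hfil]
      simp only [List.map_nil]
      rw [ih (i+1) (by omega)]
      simp

-- facts from a successful inner scan: bounds, the hit, and no zero before it
theorem pvAscanJ_some (g : List (List Int)) (n i : Nat) :
    ∀ j0 j, pvAscanJ g n i j0 = some j →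
      j0 ≤ j ∧ j < n ∧ pvCell g i j = 0 ∧ ∀ c, j0 ≤ c → c < j → pvCell g i c ≠ 0 := by
  intro j0
  induction hk : n - j0 generalizing j0 with
  | zero =>
    intro j h; rw [pvAscanJ] at h; simp [show ¬ j0 < n by omega] at h
  | succ k ih =>
    intro j h
    rw [pvAscanJ] at h
    have hj : j0 < n := by omega
    simp only [hj, dif_pos] at h
    by_cases hz : pvCell g i j0 = 0
    · simp only [hz, if_pos] at h
      cases h
      exact ⟨le_refl _, hj, hz, fun c hc1 hc2 => absurd (lt_of_le_of_lt hc1 hc2) (lt_irrefl _)⟩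
    · simp only [hz, if_neg, not_false_iff] at h
      obtain ⟨h1, h2, h3, h4⟩ := ih (j0+1) (by omega) j h
      refine ⟨by omega, h2, h3, fun c hc1 hc2 => ?_⟩
      rcases Nat.eq_or_lt_of_le hc1 with rfl | hlt
      · exact hz
      · exact h4 c hlt hc2

-- a failed inner scan means no zero in the row
theorem pvAscanJ_none (g : List (List Int)) (n i : Nat) :
    ∀ j0, pvAscanJ g n i j0 = none → ∀ c, j0 ≤ c → c < n → pvCell g i c ≠ 0 := by
  intro j0
  induction hk : n - j0 generalizing j0 with
  | zero => intro _ c hc1 hc2; omega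
  | succ k ih =>
    intro h c hc1 hc2
    rw [pvAscanJ] at h
    have hj : j0 < n := by omega
    simp only [hj, dif_pos] at h
    by_cases hz : pvCell g i j0 = 0
    · simp [hz] at h
    · simp only [hz, if_neg, not_false_iff] at h
      rcases Nat.eq_or_lt_of_le hc1 with rfl | hlt
      · exact hz
      · exact ih (j0+1) (by omega) h c hlt hc2

-- facts from a successful outer scan
theorem pvAscanI_some (g : List (List Int)) (n : Nat) :
    ∀ i0 i j, pvAscanI g n i0 = some (i, j) →
      i0 ≤ i ∧ i < g.length ∧ pvAscanJ g n i 0 = some j ∧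
      ∀ r, i0 ≤ r → r < i → pvAscanJ g n r 0 = none := by
  intro i0
  induction hk : g.length - i0 generalizing i0 with
  | zero =>
    intro i j h; rw [pvAscanI] at h; simp [show ¬ i0 < g.length by omega] at h
  | succ k ih =>
    intro i j h
    rw [pvAscanI] at h
    have hi : i0 < g.length := by omega
    simp only [hi, dif_pos] at h
    cases hj : pvAscanJ g n i0 0 with
    | some j' =>
      rw [hj] at h; simp at h
      obtain ⟨rfl, rfl⟩ := h
      exact ⟨le_refl _, hi, hj, fun r hr1 hr2 => absurd (lt_of_le_of_lt hr1 hr2) (lt_irrefl _)⟩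
    | none =>
      rw [hj] at h; simp only at h
      obtain ⟨h1, h2, h3, h4⟩ := ih (i0+1) (by omega) i j h
      refine ⟨by omega, h2, h3, fun r hr1 hr2 => ?_⟩
      rcases Nat.eq_or_lt_of_le hr1 with rfl | hlt
      · exact hj
      · exact h4 r hlt hr2

-- a 'keep the last satisfying element' fold is getLast? of the filtered list
theorem foldl_last_eq_getLast? (q : Nat → Prop) [DecidablePred q] :
    ∀ (l : List Nat) (d : Nat),
      l.foldl (fun acc x => if q x then x else acc) d
        = ((l.filter (fun x => decide (q x))).getLast?).getD d := by
  intro l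
  induction l with
  | nil => intro d; simp
  | cons a l ih =>
    intro d
    simp only [List.foldl_cons, List.filter_cons]
    by_cases ha : q a
    · rw [if_pos ha, ih]
      simp only [ha, decide_true, if_true]
      cases hfil : l.filter (fun x => decide (q x)) with
      | nil => simp
      | cons x t =>
        rw [List.getLast?_cons_cons]
        obtain ⟨y, hy⟩ := Option.isSome_iff_exists.mp (List.getLast?_isSome.mpr (List.cons_ne_nil x t))
        simp [hy]
    · rw [if_neg ha, ih]
      simp [ha]

-- for an ascending chain, max? is the last element
theorem foldl_max_sorted (l : List Nat) :
    ∀ a, (a :: l).Pairwise (· ≤ ·) → some (l.foldl max a) = (a :: l).getLast? := by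
  induction l with
  | nil => intro a _; simp
  | cons b l ih =>
    intro a h
    have hab : a ≤ b := (List.pairwise_cons.mp h).1 b (List.mem_cons_self ..)
    have hbl : (b :: l).Pairwise (· ≤ ·) := (List.pairwise_cons.mp h).2
    simp only [List.foldl_cons]
    rw [show max a b = b from Nat.max_eq_right hab]
    rw [ih b hbl]
    simp [List.getLast?_cons_cons]

theorem max?_eq_getLast? (l : List Nat) (h : l.Pairwise (· ≤ ·)) : l.max? = l.getLast? := by
  cases l with
  | nil => rfl
  | cons a l => simpa [List.max?] using foldl_max_sorted l a h

-- (range n).filter (· == j) is the singleton [j] (when j < n)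
theorem filter_range_eq_singleton (j : Nat) :
    ∀ n, (List.range n).filter (fun c => c == j) = if j < n then [j] else [] := by
  intro n
  induction n with
  | zero => simp
  | succ n ih =>
    rw [List.range_succ, List.filter_append, ih]
    by_cases h1 : j < n
    · have : ¬ (n == j) = true := by simp; omega
      simp [h1, this, show j < n + 1 by omega]
    · by_cases h2 : j = n
      · subst h2; simp
      · have : ¬ (n == j) = true := by simp; omega
        simp [h1, this, show ¬ j < n + 1 by omega]

-- the rows of B's zero list in column j are exactly the zero rows
theorem rows_eq (g : List (List Int)) (n j : Nat) (hj : j < n) :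
    ∀ m, (((List.range m).flatMap
        (fun r => ((List.range n).filter (fun c => decide (pvCell g r c = 0))).map
          (fun c => (r, c)))).filter (fun p => p.2 == j)).map Prod.fst
      = (List.range m).filter (fun r => decide (pvCell g r j = 0)) := by
  intro m
  induction m with
  | zero => simp
  | succ m ih =>
    rw [List.range_succ, List.flatMap_append, List.filter_append, List.map_append, ih,
        List.filter_append]
    congr 1
    simp only [List.flatMap_cons, List.flatMap_nil, List.append_nil]
    rw [List.filter_map]
    have hcomp : ((fun p : Nat × Nat => p.2 == j) ∘ fun c => (m, c)) = fun c => c == j := by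
      funext c; simp
    rw [hcomp, List.filter_comm, filter_range_eq_singleton j n, if_pos hj]
    by_cases hz : pvCell g m j = 0 <;> simp [hz]

-- the columns of B's zero list in row i are exactly the zero columns of row i
theorem cols_eq (g : List (List Int)) (n i : Nat) :
    ∀ m, i < m → (((List.range m).flatMap
        (fun r => ((List.range n).filter (fun c => decide (pvCell g r c = 0))).map
          (fun c => (r, c)))).filter (fun p => p.1 == i)).map Prod.snd
      = (List.range n).filter (fun c => decide (pvCell g i c = 0)) := by
  intro m
  induction m with
  | zero => omega
  | succ m ih =>
    intro him
    rw [List.range_succ, List.flatMap_append, List.filter_append, List.map_append]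
    simp only [List.flatMap_cons, List.flatMap_nil, List.append_nil]
    rw [List.filter_map]
    by_cases h : m = i
    · subst h
      have hpre : ∀ r < m, (((List.range n).filter (fun c => decide (pvCell g r c = 0))).map
          (fun c => (r, c))).filter (fun p => p.1 == m) = [] := by
        intro r hr
        rw [List.filter_map]
        have : ((List.range n).filter (fun c => decide (pvCell g r c = 0))).filter
            ((fun p => p.1 == m) ∘ fun c => (r, c)) = [] := by
          apply List.filter_eq_nil_iff.mpr
          intro c _
          simp; omega
        rw [this]; simp
      have hnil : ((List.range m).flatMap
          (fun r => ((List.range n).filter (fun c => decide (pvCell g r c = 0))).map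
            (fun c => (r, c)))).filter (fun p => p.1 == m) = [] := by
        rw [List.filter_flatMap]
        apply List.flatMap_eq_nil_iff.mpr
        intro r hr
        exact hpre r (List.mem_range.mp hr)
      rw [hnil]
      have : ((List.range n).filter (fun c => decide (pvCell g m c = 0))).filter
          ((fun p => p.1 == m) ∘ fun c => (m, c)) = (List.range n).filter (fun c => decide (pvCell g m c = 0)) := by
        apply List.filter_eq_self.mpr; intro c _; simp
      rw [this]; simp
    · have him' : i < m := by omega
      have : ((List.range n).filter (fun c => decide (pvCell g m c = 0))).filter
          ((fun p => p.1 == i) ∘ fun c => (m, c)) = [] := by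
        apply List.filter_eq_nil_iff.mpr; intro c _; simp; omega
      rw [this, ih him']
      simp

-- the generic extent bridge: A's 'last zero seen' fold from a hit position equals
-- the max over all zero positions, when there is no zero before the hit
theorem extent_bridge (q : Nat → Prop) [DecidablePred q] (i m : Nat)
    (him : i < m) (hbelow : ∀ r, r < i → ¬ q r) :
    (List.range' i (m - i)).foldl (fun acc x => if q x then x else acc) i
      = (((List.range m).filter (fun x => decide (q x))).max?).getD i := by
  have hsplit : List.range m = List.range' 0 i ++ List.range' i (m - i) := by
    rw [List.range_eq_range']
    have h := List.range'_append (s:=0) (m:=i) (n:=m-i) (step:=1)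
    simp only [Nat.one_mul, Nat.zero_add] at h
    rw [h]
    congr 1
    omega
  have hpre : (List.range' 0 i).filter (fun x => decide (q x)) = [] := by
    apply List.filter_eq_nil_iff.mpr
    intro r hr
    have : r < i := by
      have := List.mem_range'_1.mp hr
      omega
    simp [hbelow r this]
  have hpw : ((List.range' i (m - i)).filter (fun x => decide (q x))).Pairwise (· ≤ ·) :=
    ((List.pairwise_lt_range' ..).filter _).imp Nat.le_of_lt
  rw [hsplit, List.filter_append, hpre, List.nil_append,
      foldl_last_eq_getLast? q, max?_eq_getLast? _ hpw]

-- ===== VERDICT (by name: the statement is the Claim_ definition above) =====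
theorem rectangleFinder_spec : Claim_equal_rectangleFinder := by
  intro grid _hdom _hpre
  unfold Spec_rectangleFinder rectangleFinder rectangleFinder_alt
  by_cases hempty : grid.length = 0 ∨ (grid.headD []).length = 0
  · have hne : (grid.isEmpty ∨ (grid.headD []).isEmpty) := by
      rcases hempty with h | h
      · left; simpa [List.isEmpty_iff_length_eq_zero] using h
      · right; simpa [List.isEmpty_iff_length_eq_zero] using h
    rw [if_pos hempty, if_pos hne]
  · have hne : ¬ (grid.isEmpty ∨ (grid.headD []).isEmpty) := by
      intro h
      apply hempty
      rcases h with h | h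
      · left; simpa [List.isEmpty_iff_length_eq_zero] using h
      · right; simpa [List.isEmpty_iff_length_eq_zero] using h
    rw [if_neg hempty, if_neg hne]
    have hscan : pvAscanI grid (grid.headD []).length 0
        = (pvZeros grid (grid.headD []).length).head? := by
      rw [pvAscanI_eq, Nat.sub_zero, ← List.range_eq_range']
      rfl
    rw [hscan]
    cases hz : pvZeros grid (grid.headD []).length with
    | nil => rfl
    | cons hd tl =>
      obtain ⟨i, j⟩ := hd
      simp only [List.head?_cons]
      have hsome : pvAscanI grid (grid.headD []).length 0 = some (i, j) := by
        rw [hscan, hz]; rfl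
      obtain ⟨_, him, hJ, hrows⟩ := pvAscanI_some grid (grid.headD []).length 0 i j hsome
      obtain ⟨_, hjn, hij0, hcols⟩ := pvAscanJ_some grid (grid.headD []).length i 0 j hJ
      have hdown : (List.range' i (grid.length - i)).foldl
            (fun acc r => if pvCell grid r j = 0 then r else acc) i
          = ((((pvZeros grid (grid.headD []).length).filter (fun p => p.2 == j)).map
              Prod.fst).max?).getD i := by
        rw [extent_bridge (fun r => pvCell grid r j = 0) i grid.length him
              (fun r hr => pvAscanJ_none grid (grid.headD []).length r 0
                (hrows r (Nat.zero_le _) hr) j (Nat.zero_le _) hjn)]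
        unfold pvZeros
        rw [rows_eq grid (grid.headD []).length j hjn grid.length]
      have hright : (List.range' j ((grid.headD []).length - j)).foldl
            (fun acc c => if pvCell grid i c = 0 then c else acc) j
          = ((((pvZeros grid (grid.headD []).length).filter (fun p => p.1 == i)).map
              Prod.snd).max?).getD j := by
        rw [extent_bridge (fun c => pvCell grid i c = 0) j (grid.headD []).length hjn
              (fun c hc => hcols c (Nat.zero_le _) hc)]
        unfold pvZeros
        rw [cols_eq grid (grid.headD []).length i grid.length him]
      rw [hz] at hdown hright
      rw [hdown, hright]
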